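-- pv_equiv track=rewrite | github.com/HLFrye/AoC2021 | day12.py | can_double
-- ===== SOURCE A (Python) =====
-- def is_big(x: str):
--     return not x.islower()
--
-- def can_double(path):
--     seen = []
--     for step in path:
--         if is_big(step):
--             continue
--         if step in seen:
--             return False
--         seen.append(step)
--     return True
-- ===== SOURCE B (Python) =====
-- def can_double(path):
--     smalls = [s for s in path if s.islower()]
--     return len(smalls) == len(set(smalls))
-- ===== Notes on version B (the rewrite author's own statement) =====
-- stated objective: simpler
-- what changed: Replaces A's incremental seen-list scan with early return by collecting all small caves once and comparing the list's length with its set's cardinality.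
import Mathlib
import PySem

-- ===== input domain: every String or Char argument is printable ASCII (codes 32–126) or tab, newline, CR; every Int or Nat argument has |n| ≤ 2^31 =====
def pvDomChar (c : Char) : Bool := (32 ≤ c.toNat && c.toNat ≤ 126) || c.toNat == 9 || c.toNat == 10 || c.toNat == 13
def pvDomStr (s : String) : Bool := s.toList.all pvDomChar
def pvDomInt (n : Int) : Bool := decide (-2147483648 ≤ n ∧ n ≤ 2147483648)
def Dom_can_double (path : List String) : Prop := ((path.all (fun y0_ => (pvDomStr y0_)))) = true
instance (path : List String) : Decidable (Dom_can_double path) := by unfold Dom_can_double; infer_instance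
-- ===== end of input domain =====

-- B is simpler: it collects the small caves once and compares list length with set cardinality,
-- replacing A's incremental seen-list scan with early return. Return-value equivalence only.

-- Python str.islower() on the ASCII domain: at least one lowercase letter and no uppercase letter.
-- Exact on Dom (printable ASCII + tab/newline/CR): the only cased ASCII characters are a-z / A-Z.
def pyStrIslower (s : String) : Bool :=
  s.toList.any PySem.Chars.islower && s.toList.all (fun c => !(PySem.Chars.isupper c))

-- ===== PORT A =====
def isBig (x : String) : Bool := !(pyStrIslower x)

def canDoubleGo : List String → List String → Bool
  | [], _ => true
  | step :: rest, seen =>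
    if isBig step then canDoubleGo rest seen
    else if seen.contains step then false
    else canDoubleGo rest (seen ++ [step])

def can_double (path : List String) : Bool := canDoubleGo path []

-- ===== PORT B =====
def can_double_alt (path : List String) : Bool :=
  let smalls := path.filter (fun s => pyStrIslower s)
  decide (smalls.length = (PySem.Set.ofList smalls).length)

-- ===== PRECONDITION & SPEC =====
def Spec_can_double (path : List String) (out : Bool) : Prop := out = can_double_alt path
instance (path : List String) (out : Bool) : Decidable (Spec_can_double path out) := by unfold Spec_can_double; infer_instance

-- ===== CLAIM (what is proved, stated in full; the proofs are below) =====
def Claim_equal_can_double : Prop := ∀ (path : List String), Dom_can_double path → Spec_can_double path (can_double path)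

-- ===== LEMMAS AND PROOFS =====

-- A's loop returns true iff the small caves in the remainder are distinct and fresh w.r.t. seen
theorem canDoubleGo_eq_true_iff (l seen : List String) :
    canDoubleGo l seen = true ↔
      ((l.filter (fun s => pyStrIslower s)).Nodup ∧
        ∀ x ∈ l, pyStrIslower x = true → x ∉ seen) := by
  induction l generalizing seen with
  | nil => simp [canDoubleGo]
  | cons step rest ih =>
    by_cases hb : pyStrIslower step = true
    · by_cases hm : step ∈ seen
      · have h1 : canDoubleGo (step :: rest) seen = false := by
          have hm' : seen.contains step = true := by simpa using hm
          simp only [canDoubleGo, isBig, hb, Bool.not_true]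
          rw [hm']
          simp
        rw [h1]
        simp only [Bool.false_eq_true, false_iff, not_and]
        intro _ h
        exact (h step (by simp) hb) hm
      · have h1 : canDoubleGo (step :: rest) seen = canDoubleGo rest (seen ++ [step]) := by
          have hm' : seen.contains step = false := by simpa using hm
          simp only [canDoubleGo, isBig, hb, Bool.not_true]
          rw [hm']
          simp
        rw [h1, ih, List.filter_cons, if_pos hb, List.nodup_cons]
        constructor
        · rintro ⟨hnd, hfresh⟩
          refine ⟨⟨fun hx => ?_, hnd⟩, fun x hx hfx hxs => ?_⟩
          · rcases List.mem_filter.mp hx with ⟨hx1, hx2⟩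
            exact (hfresh step hx1 hb) (by simp)
          · rcases List.mem_cons.mp hx with rfl | hx
            · exact absurd hxs hm
            · exact (hfresh x hx hfx) (by simp [hxs])
        · rintro ⟨⟨hstep, hnd⟩, hfresh⟩
          refine ⟨hnd, fun x hx hfx hxs => ?_⟩
          rcases List.mem_append.mp hxs with hxs | hxs
          · exact hfresh x (List.mem_cons_of_mem _ hx) hfx hxs
          · simp only [List.mem_singleton] at hxs
            subst hxs
            exact hstep (List.mem_filter.mpr ⟨hx, hfx⟩)
    · have h1 : canDoubleGo (step :: rest) seen = canDoubleGo rest seen := by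
        simp [canDoubleGo, isBig, hb]
      rw [h1, ih, List.filter_cons, if_neg hb]
      constructor
      · rintro ⟨hnd, hfresh⟩
        refine ⟨hnd, fun x hx hfx => ?_⟩
        rcases List.mem_cons.mp hx with rfl | hx
        · exact absurd hfx hb
        · exact hfresh x hx hfx
      · rintro ⟨hnd, hfresh⟩
        exact ⟨hnd, fun x hx hfx => hfresh x (List.mem_cons_of_mem _ hx) hfx⟩

-- foldl Set.add: length grows by at most one per element
theorem foldl_add_length_le (xs : List String) (s : PySem.Set String) :
    (xs.foldl PySem.Set.add s).length ≤ s.length + xs.length := by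
  induction xs generalizing s with
  | nil => simp
  | cons x xs ih =>
    simp only [List.foldl_cons]
    calc (xs.foldl PySem.Set.add (PySem.Set.add s x)).length
        ≤ (PySem.Set.add s x).length + xs.length := ih _
      _ ≤ s.length + (x :: xs).length := by
          simp only [PySem.Set.add]
          split
          · simp
          · simp
            omega

-- equality holds exactly when xs is duplicate-free and disjoint from s
theorem foldl_add_length_eq_iff (xs : List String) (s : PySem.Set String) :
    (xs.foldl PySem.Set.add s).length = s.length + xs.length ↔
      (xs.Nodup ∧ ∀ x ∈ xs, x ∉ s) := by
  induction xs generalizing s with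
  | nil => simp
  | cons x xs ih =>
    simp only [List.foldl_cons]
    by_cases hc : x ∈ s
    · have hadd : PySem.Set.add s x = s := by
        simp [PySem.Set.add, PySem.Set.contains, hc]
      rw [hadd]
      constructor
      · intro h
        have := foldl_add_length_le xs s
        simp only [List.length_cons] at h
        omega
      · rintro ⟨_, hfresh⟩
        exact absurd hc (hfresh x (by simp))
    · have hadd : PySem.Set.add s x = s ++ [x] := by
        simp [PySem.Set.add, PySem.Set.contains, hc]
      have hlen : List.length s + (x :: xs).length = List.length (s ++ [x]) + xs.length := by
        simp
        omega
      rw [hadd, hlen, ih, List.nodup_cons]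
      constructor
      · rintro ⟨hnd, hfresh⟩
        refine ⟨⟨fun hx => (hfresh x hx) (by simp), hnd⟩, fun y hy hys => ?_⟩
        rcases List.mem_cons.mp hy with rfl | hy
        · exact hc hys
        · exact (hfresh y hy) (by simp [hys])
      · rintro ⟨⟨hx, hnd⟩, hfresh⟩
        refine ⟨hnd, fun y hy hys => ?_⟩
        rcases List.mem_append.mp hys with hys | hys
        · exact hfresh y (List.mem_cons_of_mem _ hy) hys
        · simp only [List.mem_singleton] at hys
          subst hys
          exact hx hy

theorem alt_eq_true_iff (path : List String) :
    can_double_alt path = true ↔ (path.filter (fun s => pyStrIslower s)).Nodup := by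
  unfold can_double_alt
  simp only [decide_eq_true_eq]
  rw [PySem.Set.ofList_eq_foldl]
  have h := foldl_add_length_eq_iff (path.filter (fun s => pyStrIslower s)) PySem.Set.empty
  simp only [PySem.Set.empty, List.length_nil, zero_add, List.not_mem_nil, not_false_iff,
    implies_true, and_true] at h
  exact ⟨fun hlen => h.mp hlen.symm, fun hnd => (h.mpr hnd).symm⟩

-- ===== VERDICT (by name: the statement is the Claim_ definition above) =====
theorem can_double_spec : Claim_equal_can_double := by
  intro path _
  unfold Spec_can_double can_double
  have hA := canDoubleGo_eq_true_iff path []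
  simp only [List.not_mem_nil, not_false_iff, implies_true, and_true] at hA
  have hB := alt_eq_true_iff path
  by_cases hnd : (path.filter (fun s => pyStrIslower s)).Nodup
  · rw [hA.mpr hnd, hB.mpr hnd]
  · have h1 : canDoubleGo path [] = false := by
      cases h : canDoubleGo path [] with
      | false => rfl
      | true => exact absurd (hA.mp h) hnd
    have h2 : can_double_alt path = false := by
      cases h : can_double_alt path with
      | false => rfl
      | true => exact absurd (hB.mp h) hnd
    rw [h1, h2]
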